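-- pv_equiv track=rewrite | github.com/pypi-data/pypi-mirror-398 | packages/scm-python-core/scm_python_core-1.3.0.dev0-py3-none-any.whl/tio/tfile.py | line_not_in_lines
-- ===== SOURCE A (Python) =====
-- def line_not_in_lines(lines, tpl):
--     foo = tpl.split("\n")
--     for line in lines:
--         for line_foo in foo:
--             if line_foo == line or (line_foo + "\n") == line:
--                 foo.remove(line_foo)
--                 break
--     return foo
-- ===== SOURCE B (Python) =====
-- from collections import Counter
--
-- def line_not_in_lines(lines, tpl):
--     foo = tpl.split("\n")
--     avail = Counter(foo)
--     drop = Counter()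
--     for line in lines:
--         key = line[:-1] if line.endswith("\n") else line
--         if drop[key] < avail[key]:
--             drop[key] += 1
--     out = []
--     for v in foo:
--         if drop[v] > 0:
--             drop[v] -= 1
--         else:
--             out.append(v)
--     return out
-- ===== Notes on version B (the rewrite author's own statement) =====
-- stated objective: faster
-- what changed: A repeatedly scans the remaining template pieces and calls list.remove per input line; B builds a Counter of available pieces, counts per-key requested drops in one pass over lines, then emits the surviving pieces in a single sweep.
import Mathlib
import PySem

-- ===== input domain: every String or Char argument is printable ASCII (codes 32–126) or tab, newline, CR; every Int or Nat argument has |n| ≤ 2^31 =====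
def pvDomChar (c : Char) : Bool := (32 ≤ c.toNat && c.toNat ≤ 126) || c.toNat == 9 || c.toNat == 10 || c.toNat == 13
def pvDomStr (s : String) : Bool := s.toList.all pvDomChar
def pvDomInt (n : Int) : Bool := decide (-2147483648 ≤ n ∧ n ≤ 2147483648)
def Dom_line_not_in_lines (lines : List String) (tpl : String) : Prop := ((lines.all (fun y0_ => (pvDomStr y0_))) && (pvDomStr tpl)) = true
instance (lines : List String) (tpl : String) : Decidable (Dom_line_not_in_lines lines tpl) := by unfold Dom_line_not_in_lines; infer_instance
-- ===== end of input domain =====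

-- B replaces A's quadratic scan-and-remove loop with two Counter passes (count available
-- occurrences, count requested drops, then emit the survivors in one sweep): alternative algorithm.

-- ===== PORT A =====
-- inner 'for line_foo in foo: if …: foo.remove(line_foo); break' for one line
def lnlStep (foo : List (List Char)) (line : List Char) : List (List Char) :=
  match foo.find? (fun lf => lf == line || (lf ++ ['\n']) == line) with
  | some lf => (PySem.List.remove? foo lf).getD foo
  | none => foo

def line_not_in_lines (lines : List String) (tpl : String) : List String :=
  let foo := PySem.Chars.splitOn tpl.toList ['\n']
  ((lines.map String.toList).foldl lnlStep foo).map String.ofList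

-- ===== PORT B =====
-- key = line[:-1] if line.endswith("\n") else line
def lnlKey (line : List Char) : List Char :=
  if PySem.Chars.endswith line ['\n'] then PySem.List.slice line none (some (-1)) else line

-- one iteration of B's first loop: bump drop[key] if another occurrence is still available
def lnlDrop (avail : PySem.Dict (List Char) Int) (d : PySem.Dict (List Char) Int)
    (line : List Char) : PySem.Dict (List Char) Int :=
  let key := lnlKey line
  if d.getD key 0 < avail.getD key 0 then d.modify key 0 (· + 1) else d

-- B's second loop: skip the first drop[v] occurrences of each value v
def lnlEmit : List (List Char) → PySem.Dict (List Char) Int → List (List Char)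
  | [], _ => []
  | v :: rest, d =>
      if 0 < d.getD v 0 then lnlEmit rest (d.modify v 0 (· - 1))
      else v :: lnlEmit rest d

def line_not_in_lines_alt (lines : List String) (tpl : String) : List String :=
  let foo := PySem.Chars.splitOn tpl.toList ['\n']
  let avail := PySem.Dict.counter foo
  let drop := (lines.map String.toList).foldl (lnlDrop avail) PySem.Dict.empty
  (lnlEmit foo drop).map String.ofList

-- ===== PRECONDITION & SPEC =====
def Spec_line_not_in_lines (lines : List String) (tpl : String) (out : List String) : Prop := out = line_not_in_lines_alt lines tpl
instance (lines : List String) (tpl : String) (out : List String) : Decidable (Spec_line_not_in_lines lines tpl out) := by unfold Spec_line_not_in_lines; infer_instance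

-- ===== CLAIM (what is proved, stated in full; the proofs are below) =====
def Claim_equal_line_not_in_lines : Prop := ∀ (lines : List String) (tpl : String), Dom_line_not_in_lines lines tpl → Spec_line_not_in_lines lines tpl (line_not_in_lines lines tpl)

-- ===== LEMMAS AND PROOFS =====

-- pieces of tpl.split("\n") never contain '\n'
theorem go_nonl : ∀ (fuel : Nat) (l cur : List Char) (acc : List (List Char)),
    l.length < fuel → '\n' ∉ cur → (∀ p ∈ acc, '\n' ∉ p) →
    ∀ p ∈ PySem.Chars.splitOn.go ['\n'] fuel l cur acc, '\n' ∉ p := by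
  intro fuel
  induction fuel with
  | zero => intro l cur acc hl; omega
  | succ fuel ih =>
    intro l cur acc hl hcur hacc p hp
    cases l with
    | nil =>
      rw [PySem.Chars.splitOn.go.eq_def] at hp
      simp only [List.mem_reverse, List.mem_cons] at hp
      rcases hp with h | h
      · subst h; simpa using hcur
      · exact hacc p h
    | cons c rest =>
      have hgo : PySem.Chars.splitOn.go ['\n'] (fuel+1) (c::rest) cur acc
          = if ['\n'].isPrefixOf (c::rest) = true then
              PySem.Chars.splitOn.go ['\n'] fuel (List.drop 1 (c::rest)) [] (cur.reverse :: acc)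
            else PySem.Chars.splitOn.go ['\n'] fuel rest (c :: cur) acc := by
        rw [PySem.Chars.splitOn.go.eq_def]; rfl
      rw [hgo] at hp
      simp only [List.length_cons] at hl
      by_cases hpre : List.isPrefixOf ['\n'] (c :: rest) = true
      · rw [if_pos hpre] at hp
        refine ih _ _ _ (by simpa using hl) (by simp) ?_ p hp
        intro q hq
        rcases List.mem_cons.mp hq with h | h
        · subst h; simpa using hcur
        · exact hacc q h
      · rw [if_neg hpre] at hp
        have hc : c ≠ '\n' := by
          intro h; subst h
          simp [List.isPrefixOf] at hpre
        refine ih _ _ _ (by omega) ?_ hacc p hp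
        intro h
        rcases List.mem_cons.mp h with h1 | h1
        · exact hc h1.symm
        · exact hcur h1

theorem splitOn_nonl (s : List Char) : ∀ p ∈ PySem.Chars.splitOn s ['\n'], '\n' ∉ p := by
  intro p hp
  unfold PySem.Chars.splitOn at hp
  exact go_nonl (s.length + 1) s [] [] (by omega) (by simp) (by simp) p hp

-- getD of a modify, pointwise
theorem getD_modify (d : PySem.Dict (List Char) Int) (k x : List Char) (f : Int → Int) :
    (d.modify k 0 f).getD x 0 = if x = k then f (d.getD k 0) else d.getD x 0 := by
  unfold PySem.Dict.modify; rw [PySem.Dict.getD_insert]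

-- lnlEmit only reads the dict through getD · 0
theorem emit_congr (foo : List (List Char)) : ∀ (d1 d2 : PySem.Dict (List Char) Int),
    (∀ x, d1.getD x 0 = d2.getD x 0) → lnlEmit foo d1 = lnlEmit foo d2 := by
  induction foo with
  | nil => intro _ _ _; rfl
  | cons v rest ih =>
    intro d1 d2 h
    simp only [lnlEmit, h v]
    split
    · exact ih _ _ (fun x => by simp only [getD_modify, h x, h v])
    · rw [ih _ _ h]

theorem emit_empty (foo : List (List Char)) : lnlEmit foo PySem.Dict.empty = foo := by
  induction foo with
  | nil => rfl
  | cons v rest ih =>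
    simp only [lnlEmit]
    have : (PySem.Dict.empty : PySem.Dict (List Char) Int).getD v 0 = 0 := rfl
    rw [this]; simp [ih]

-- emitting after one more drop of key = erasing the first occurrence of key
theorem emit_inc : ∀ (foo : List (List Char)) (d : PySem.Dict (List Char) Int) (key : List Char),
    (∀ v, 0 ≤ d.getD v 0) → d.getD key 0 < (foo.count key : Int) →
    lnlEmit foo (d.modify key 0 (· + 1)) = (lnlEmit foo d).erase key := by
  intro foo
  induction foo with
  | nil => intro d key hb hk; simp at hk; exact absurd hk (by have := hb key; omega)
  | cons v rest ih =>
    intro d key hb hk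
    by_cases hv : v = key
    · subst hv
      rw [List.count_cons_self] at hk
      push_cast at hk
      by_cases hpos : 0 < d.getD v 0
      · have h1 : 0 < (d.modify v 0 (· + 1)).getD v 0 := by simp only [getD_modify]; simp; omega
        simp only [lnlEmit, if_pos hpos, if_pos h1]
        have heq : lnlEmit rest ((d.modify v 0 (· + 1)).modify v 0 (· - 1))
            = lnlEmit rest ((d.modify v 0 (· - 1)).modify v 0 (· + 1)) := by
          apply emit_congr
          intro x; simp only [getD_modify]; split_ifs <;> omega
        rw [heq, ih]
        · intro x; simp only [getD_modify]; split_ifs with h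
          · omega
          · exact hb x
        · simp only [getD_modify]; simp; omega
      · have h0 : d.getD v 0 = 0 := le_antisymm (by omega) (hb v)
        have h1 : 0 < (d.modify v 0 (· + 1)).getD v 0 := by simp only [getD_modify]; simp; omega
        simp only [lnlEmit, if_pos h1, if_neg hpos]
        rw [List.erase_cons_head]
        apply emit_congr
        intro x; simp only [getD_modify]; split_ifs with h
        · subst h; omega
        · rfl
    · have hk' : d.getD key 0 < (rest.count key : Int) := by
        rwa [List.count_cons_of_ne hv] at hk
      have hgv : (d.modify key 0 (· + 1)).getD v 0 = d.getD v 0 := by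
        simp only [getD_modify]; simp [hv]
      by_cases hpos : 0 < d.getD v 0
      · simp only [lnlEmit, hgv, if_pos hpos]
        have heq : lnlEmit rest ((d.modify key 0 (· + 1)).modify v 0 (· - 1))
            = lnlEmit rest ((d.modify v 0 (· - 1)).modify key 0 (· + 1)) := by
          apply emit_congr
          intro x; simp only [getD_modify]; split_ifs <;> simp_all
        rw [heq, ih]
        · intro x; simp only [getD_modify]; split_ifs with h
          · omega
          · exact hb x
        · simp only [getD_modify]; rw [if_neg (fun h => hv h.symm)]; exact hk'
      · simp only [lnlEmit, hgv, if_neg hpos]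
        rw [ih _ _ hb hk', List.erase_cons_tail (by simp [hv])]

theorem mem_emit_iff : ∀ (foo : List (List Char)) (d : PySem.Dict (List Char) Int) (key : List Char),
    (∀ v, 0 ≤ d.getD v 0) → d.getD key 0 ≤ (foo.count key : Int) →
    (key ∈ lnlEmit foo d ↔ d.getD key 0 < (foo.count key : Int)) := by
  intro foo
  induction foo with
  | nil =>
    intro d key hb hub
    simp only [lnlEmit, List.count_nil, List.not_mem_nil, false_iff, Nat.cast_zero]
    have := hb key; omega
  | cons v rest ih =>
    intro d key hb hub
    by_cases hv : v = key
    · subst hv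
      rw [List.count_cons_self] at *
      push_cast at *
      by_cases hpos : 0 < d.getD v 0
      · simp only [lnlEmit, if_pos hpos]
        rw [ih]
        · simp only [getD_modify]
          simp only [reduceIte]
          omega
        · intro x; simp only [getD_modify]; split_ifs <;> [omega; exact hb x]
        · simp only [getD_modify]
          simp only [reduceIte]
          omega
      · have h0 : d.getD v 0 = 0 := le_antisymm (by omega) (hb v)
        simp only [lnlEmit, if_neg hpos]
        constructor
        · intro _; omega
        · intro _; exact List.mem_cons_self
    · have hcnt : List.count key (v :: rest) = List.count key rest := List.count_cons_of_ne hv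
      rw [hcnt] at hub ⊢
      by_cases hpos : 0 < d.getD v 0
      · simp only [lnlEmit, if_pos hpos]
        rw [ih]
        · simp only [getD_modify]; rw [if_neg (fun h => hv h.symm)]
        · intro x; simp only [getD_modify]; split_ifs <;> [omega; exact hb x]
        · simp only [getD_modify]; rw [if_neg (fun h => hv h.symm)]; exact hub
      · simp only [lnlEmit, if_neg hpos, List.mem_cons]
        rw [ih _ _ hb hub]
        constructor
        · rintro (h | h)
          · exact absurd h.symm hv
          · exact h
        · intro h; exact Or.inr h

-- line[:-1] is dropLast
theorem slice_neg_one (l : List Char) :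
    PySem.List.slice l none (some (-1)) = l.dropLast := by
  have h := PySem.Str.slice_to_neg_one (String.ofList l)
  simp only [PySem.Str.slice, String.toList_ofList] at h
  simpa using h

-- A's match condition, on a newline-free candidate, is a match against B's key
theorem pred_eq (line lf : List Char) (h : '\n' ∉ lf) :
    (lf == line || (lf ++ ['\n']) == line) = (lf == lnlKey line) := by
  unfold lnlKey
  by_cases he : PySem.Chars.endswith line ['\n']
  · rw [if_pos he]
    have hsuf : ['\n'] <:+ line := by
      unfold PySem.Chars.endswith at he
      exact List.isSuffixOf_iff_suffix.mp he
    obtain ⟨pre, hpre⟩ := hsuf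
    subst hpre
    rw [slice_neg_one]
    have h1 : (lf == pre ++ ['\n']) = false := by
      simp only [beq_eq_false_iff_ne, ne_eq]
      intro hh; subst hh; simp at h
    rw [h1]
    simp only [Bool.false_or]
    have h2 : (pre ++ ['\n']).dropLast = pre := List.dropLast_concat
    rw [h2]
    by_cases hq : lf = pre <;> simp [hq]
  · rw [if_neg he]
    have h2 : ((lf ++ ['\n']) == line) = false := by
      simp only [beq_eq_false_iff_ne, ne_eq]
      intro hh
      apply he
      unfold PySem.Chars.endswith
      rw [← hh]
      exact List.isSuffixOf_iff_suffix.mpr ⟨lf, rfl⟩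
    rw [h2, Bool.or_false]

-- foo.remove(v) for a member v is List.erase
theorem remove_getD_eq_erase : ∀ (foo : List (List Char)) (key : List Char), key ∈ foo →
    (PySem.List.remove? foo key).getD foo = foo.erase key := by
  intro foo
  induction foo with
  | nil => intro key h; simp at h
  | cons lf r ih =>
    intro key h
    unfold PySem.List.remove?
    rw [List.idxOf?_cons]
    by_cases hh : lf = key
    · subst hh
      simp [List.erase_cons_head]
    · rw [if_neg (by simp [hh])]
      have hkr : key ∈ r := by
        rcases List.mem_cons.mp h with h1 | h1
        · exact absurd h1.symm hh
        · exact h1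
      obtain ⟨k, hk⟩ := Option.isSome_iff_exists.mp (List.isSome_idxOf?.mpr hkr)
      rw [hk]
      simp only [Option.map_some, Option.getD_some, List.eraseIdx_cons_succ]
      rw [List.erase_cons_tail (by simp [hh])]
      have := ih key hkr
      unfold PySem.List.remove? at this
      rw [hk] at this
      simp only [Option.map_some, Option.getD_some] at this
      rw [this]

theorem find?_beq_self : ∀ (foo : List (List Char)) (key : List Char), key ∈ foo →
    foo.find? (fun lf => lf == key) = some key := by
  intro foo
  induction foo with
  | nil => intro key h; simp at h
  | cons lf r ih =>
    intro key h
    rw [List.find?_cons]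
    by_cases hh : lf = key
    · subst hh; simp
    · rw [show (lf == key) = false by simp [hh]]
      refine ih key ?_
      rcases List.mem_cons.mp h with h1 | h1
      · exact absurd h1.symm hh
      · exact h1

-- A's inner loop = erase the first occurrence of the key (on newline-free elements)
theorem step_eq (foo : List (List Char)) (line : List Char)
    (h : ∀ lf ∈ foo, '\n' ∉ lf) : lnlStep foo line = foo.erase (lnlKey line) := by
  unfold lnlStep
  have hf : foo.find? (fun lf => lf == line || (lf ++ ['\n']) == line)
      = foo.find? (fun lf => lf == lnlKey line) := by
    induction foo with
    | nil => rfl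
    | cons lf r ih =>
      rw [List.find?_cons, List.find?_cons, pred_eq line lf (h lf List.mem_cons_self)]
      exact match hbe : (lf == lnlKey line) with
      | true => rfl
      | false => ih (fun x hx => h x (List.mem_cons_of_mem _ hx))
  rw [hf]
  by_cases hm : lnlKey line ∈ foo
  · rw [find?_beq_self foo _ hm]
    exact remove_getD_eq_erase foo _ hm
  · have hn : foo.find? (fun lf => lf == lnlKey line) = none := by
      rw [List.find?_eq_none]
      intro x hx
      simp only [beq_iff_eq]
      intro hh; subst hh; exact hm hx
    rw [hn, List.erase_of_not_mem hm]

-- the two folds agree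
theorem loop_eq (foo : List (List Char)) : ∀ (ls : List (List Char)) (d : PySem.Dict (List Char) Int),
    (∀ v, 0 ≤ d.getD v 0 ∧ d.getD v 0 ≤ (foo.count v : Int)) →
    ls.foldl (fun acc l => acc.erase (lnlKey l)) (lnlEmit foo d)
      = lnlEmit foo (ls.foldl (lnlDrop (PySem.Dict.counter foo)) d) := by
  intro ls
  induction ls with
  | nil => intro d _; rfl
  | cons line ls ih =>
    intro d hb
    simp only [List.foldl_cons]
    have hcnt : (PySem.Dict.counter foo).getD (lnlKey line) 0 = (foo.count (lnlKey line) : Int) :=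
      PySem.Dict.getD_counter foo (lnlKey line)
    by_cases hlt : d.getD (lnlKey line) 0 < (foo.count (lnlKey line) : Int)
    · have hdrop : lnlDrop (PySem.Dict.counter foo) d line = d.modify (lnlKey line) 0 (· + 1) := by
        show (if d.getD (lnlKey line) 0 < (PySem.Dict.counter foo).getD (lnlKey line) 0
          then d.modify (lnlKey line) 0 (· + 1) else d) = _
        rw [hcnt, if_pos hlt]
      rw [hdrop, ← emit_inc foo d (lnlKey line) (fun v => (hb v).1) hlt]
      apply ih
      intro v
      simp only [getD_modify]
      split_ifs with hv
      · rw [hv]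
        exact ⟨by have := (hb (lnlKey line)).1; omega, by omega⟩
      · exact hb v
    · have hdrop : lnlDrop (PySem.Dict.counter foo) d line = d := by
        show (if d.getD (lnlKey line) 0 < (PySem.Dict.counter foo).getD (lnlKey line) 0
          then d.modify (lnlKey line) 0 (· + 1) else d) = _
        rw [hcnt, if_neg hlt]
      have hnm : lnlKey line ∉ lnlEmit foo d := by
        rw [mem_emit_iff foo d (lnlKey line) (fun v => (hb v).1) (hb (lnlKey line)).2]
        exact hlt
      rw [hdrop, List.erase_of_not_mem hnm]
      exact ih d hb

theorem foldl_step_eq_erase : ∀ (ls : List (List Char)) (foo : List (List Char)),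
    (∀ lf ∈ foo, '\n' ∉ lf) →
    ls.foldl lnlStep foo = ls.foldl (fun acc l => acc.erase (lnlKey l)) foo := by
  intro ls
  induction ls with
  | nil => intro foo _; rfl
  | cons line ls ih =>
    intro foo h
    simp only [List.foldl_cons]
    rw [step_eq foo line h]
    exact ih _ (fun lf hlf => h lf (List.erase_sublist.mem hlf))

-- ===== VERDICT (by name: the statement is the Claim_ definition above) =====
theorem line_not_in_lines_spec : Claim_equal_line_not_in_lines := by
  intro lines tpl _
  unfold Spec_line_not_in_lines line_not_in_lines line_not_in_lines_alt
  dsimp only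
  have hn := splitOn_nonl tpl.toList
  rw [foldl_step_eq_erase _ _ hn]
  have h0 : ∀ v, (0:Int) ≤ (PySem.Dict.empty : PySem.Dict (List Char) Int).getD v 0 ∧
      (PySem.Dict.empty : PySem.Dict (List Char) Int).getD v 0 ≤ ((PySem.Chars.splitOn tpl.toList ['\n']).count v : Int) := by
    intro v
    constructor <;> simp [PySem.Dict.empty, PySem.Dict.getD, PySem.Dict.get?]
  have := loop_eq (PySem.Chars.splitOn tpl.toList ['\n']) (lines.map String.toList) PySem.Dict.empty h0
  rw [emit_empty] at this
  rw [this]
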